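-- pv_equiv track=rewrite | github.com/albertgarciandres/Jutge | List 8/Chain of powers/Chain_of_powers.py | short_power7_chains
-- ===== SOURCE A (Python) =====
-- def is_power7(n):
--     '''
--     Requires a non negative integer n.
--     Returns True when n is a power of 7
--     Returns False when n is not a power of 7
--     '''
--     if n == 0:
--         return False
--     while n != 1:
--         if n%7 != 0:
--             return False
--         n = n//7
--     return True
--
-- def short_power7_chains(f, k):
-- 	'''
-- 	>>> short_power7_chains([1, 7, 49, 7*7*7, 2], 3)
-- 	False
-- 	>>> short_power7_chains([1, 7, 49, 7*7*7, 2], 4)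
-- 	True
-- 	>>> short_power7_chains([1, 7, 14, 7*7*7, 21, 28], 2)
-- 	True
-- 	>>> short_power7_chains([14, 7], 1)
-- 	True
-- 	>>> short_power7_chains([], 1)
-- 	True
-- 	'''
--
-- 	counter = 0
-- 	posi= 0
--     # where p stores the position of the number in the list
-- 	for p, num in enumerate(f):
-- 		power = is_power7(num)
--
-- 		if power == True:
-- 			counter = counter + 1
-- 			if counter == 1:
-- 				posi = p
--
-- 		if power != True:
-- 			if counter > k:
-- 				return False
-- 			else:
-- 				counter = 0
--
-- 	if counter > k:
-- 		return False
-- 	else: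
-- 		return True
-- ===== SOURCE B (Python) =====
-- def is_power7(n):
--     '''
--     Requires a non negative integer n.
--     Returns True when n is a power of 7
--     Returns False when n is not a power of 7
--     '''
--     if n == 0:
--         return False
--     while n != 1:
--         if n%7 != 0:
--             return False
--         n = n//7
--     return True
--
-- def short_power7_chains(f, k):
--     # Stage 1: boundary indices of the non-power elements, with sentinels.
--     bounds = [-1] + [i for i, x in enumerate(f) if not is_power7(x)] + [len(f)]
--     # Stage 2: each gap between consecutive boundaries is a maximal power run.
--     return all(b - a - 1 <= k for a, b in zip(bounds, bounds[1:]))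
-- ===== Notes on version B (the rewrite author's own statement) =====
-- stated objective: alternative
-- what changed: B first builds the list of boundary indices of non-power elements (with sentinels -1 and len(f)) and then checks that every gap between consecutive boundaries is at most k, replacing A's single-pass counter/reset state machine with early returns.
import Mathlib
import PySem

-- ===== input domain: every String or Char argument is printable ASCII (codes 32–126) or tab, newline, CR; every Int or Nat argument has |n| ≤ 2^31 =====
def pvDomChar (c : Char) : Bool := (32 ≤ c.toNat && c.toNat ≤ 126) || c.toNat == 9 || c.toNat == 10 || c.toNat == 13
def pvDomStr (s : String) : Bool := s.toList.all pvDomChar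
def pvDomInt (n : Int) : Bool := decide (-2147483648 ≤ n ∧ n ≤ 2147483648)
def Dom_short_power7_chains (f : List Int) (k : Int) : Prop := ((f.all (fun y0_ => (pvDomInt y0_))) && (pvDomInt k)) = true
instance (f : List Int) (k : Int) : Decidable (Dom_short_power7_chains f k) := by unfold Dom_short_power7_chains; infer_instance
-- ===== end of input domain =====

-- B replaces A's counter/reset state machine by two staged passes: first collect the
-- boundary indices of non-power elements (with sentinels -1 and len(f)), then check
-- every gap between consecutive boundaries against k (alternative decomposition).

-- ===== PORT A =====
-- is_power7's while loop, ported with fuel n.natAbs (ample: the loop runs at most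
-- log7|n| times and is only entered with n ≠ 0); shared verbatim by both Pythons.
def isPower7Go : Nat → Int → Bool
  | 0, _ => false
  | fuel+1, n =>
    if n = 1 then true
    else if PySem.Int.mod n 7 ≠ 0 then false
    else isPower7Go fuel (PySem.Int.floordiv n 7)

def isPower7 (n : Int) : Bool :=
  if n = 0 then false else isPower7Go n.natAbs n

-- A's for-loop with early return, carrying (p, counter, posi) exactly as A does.
def goA (k : Int) : List Int → Int → Int → Int → Bool
  | [], _, counter, _ => !(decide (counter > k))
  | num :: rest, p, counter, posi =>
    let power := isPower7 num
    if power then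
      let counter' := counter + 1
      let posi' := if counter' = 1 then p else posi
      goA k rest (p + 1) counter' posi'
    else
      if counter > k then false
      else goA k rest (p + 1) 0 posi

def short_power7_chains (f : List Int) (k : Int) : Bool :=
  goA k f 0 0 0

-- ===== PORT B =====
-- the comprehension [i for i, x in enumerate(f) if not is_power7(x)], index carried as Int
def idxsB : List Int → Int → List Int
  | [], _ => []
  | x :: rest, i =>
    if isPower7 x then idxsB rest (i + 1) else i :: idxsB rest (i + 1)

-- all(b - a - 1 <= k for a, b in zip(bounds, bounds[1:]))
def gapsOK (k : Int) : List Int → Bool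
  | a :: b :: rest => decide (b - a - 1 ≤ k) && gapsOK k (b :: rest)
  | _ => true

def short_power7_chains_alt (f : List Int) (k : Int) : Bool :=
  gapsOK k ((-1 : Int) :: (idxsB f 0 ++ [(f.length : Int)]))

-- ===== PRECONDITION & SPEC =====
def Spec_short_power7_chains (f : List Int) (k : Int) (out : Bool) : Prop := out = short_power7_chains_alt f k
instance (f : List Int) (k : Int) (out : Bool) : Decidable (Spec_short_power7_chains f k out) := by unfold Spec_short_power7_chains; infer_instance

-- ===== CLAIM (what is proved, stated in full; the proofs are below) =====
def Claim_equal_short_power7_chains : Prop := ∀ (f : List Int) (k : Int), Dom_short_power7_chains f k → Spec_short_power7_chains f k (short_power7_chains f k)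

-- ===== LEMMAS AND PROOFS =====

-- runMax rest c: the largest value A's power-run counter reaches while processing
-- `rest` with current counter c; both programs decide runMax f 0 ≤ k.
def runMax : List Int → Int → Int
  | [], c => c
  | x :: rest, c =>
    if isPower7 x then runMax rest (c + 1) else max c (runMax rest 0)

theorem goA_eq_runMax (k : Int) (rest : List Int) (p counter posi : Int) :
    goA k rest p counter posi = decide (runMax rest counter ≤ k) := by
  induction rest generalizing p counter posi with
  | nil => simp [goA, runMax, ← decide_not, decide_eq_decide]
  | cons x r ih =>
    simp only [goA, runMax]
    by_cases hp : isPower7 x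
    · simp [hp, ih]
    · by_cases hk : counter > k
      · have hmk : ¬ (max counter (runMax r 0) ≤ k) :=
          fun hle => absurd (le_trans (le_max_left _ _) hle) (not_le.mpr hk)
        simp [hp, hk, hmk]
      · simp only [hp, Bool.false_eq_true, if_false, gt_iff_lt]
        rw [if_neg (by omega), ih]
        simp only [decide_eq_decide, max_le_iff]
        omega

theorem gapsOK_eq_runMax (k : Int) (f : List Int) (i a : Int) :
    gapsOK k (a :: (idxsB f i ++ [i + (f.length : Int)])) =
      decide (runMax f (i - a - 1) ≤ k) := by
  induction f generalizing i a with
  | nil => simp [idxsB, gapsOK, runMax]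
  | cons x r ih =>
    have hlen : i + ((x :: r).length : Int) = (i + 1) + (r.length : Int) := by
      push_cast [List.length_cons]; ring
    by_cases hp : isPower7 x
    · rw [show idxsB (x :: r) i = idxsB r (i + 1) from by simp [idxsB, hp], hlen,
        ih (i + 1) a,
        show runMax (x :: r) (i - a - 1) = runMax r (i - a - 1 + 1) from by
          simp [runMax, hp],
        show i + 1 - a - 1 = i - a - 1 + 1 from by ring]
    · rw [show idxsB (x :: r) i = i :: idxsB r (i + 1) from by simp [idxsB, hp], hlen]
      simp only [List.cons_append, gapsOK]
      rw [ih (i + 1) i, show i + 1 - i - 1 = (0 : Int) from by ring]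
      simp only [runMax, hp, Bool.false_eq_true, if_false]
      rw [show ∀ p q : Prop, ∀ (_ : Decidable p) (_ : Decidable q), (decide p && decide q) = decide (p ∧ q) from fun p q _ _ => by simp]
      simp only [max_le_iff]

-- ===== VERDICT (by name: the statement is the Claim_ definition above) =====
theorem short_power7_chains_spec : Claim_equal_short_power7_chains := by
  intro f k _
  unfold Spec_short_power7_chains short_power7_chains short_power7_chains_alt
  rw [goA_eq_runMax, show ((f.length : Int)) = 0 + (f.length : Int) from by ring,
    gapsOK_eq_runMax k f 0 (-1)]
  norm_num
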